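-- pv_equiv track=rewrite | github.com/MD2903/Advent | dag_6.py | everyone_yes
-- ===== SOURCE A (Python) =====
-- def everyone_yes(string):
--     string = string.split()
--     q_yes = string[0]
--     for ii in range(1,len(string)):
--         for char in q_yes:
--             if char not in string[ii]:
--                 q_yes = q_yes.replace(char,"")
--     return len(q_yes)
-- ===== SOURCE B (Python) =====
-- def everyone_yes(string):
--     tokens = string.split()
--     common = set(tokens[0])
--     for t in tokens[1:]:
--         common &= set(t)
--     return sum(1 for c in tokens[0] if c in common)
-- ===== Notes on version B (the rewrite author's own statement) =====
-- stated objective: simpler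
-- what changed: Replaces the nested replace/membership mutation loop with a set-intersection pass over all tokens followed by one count over the first token's characters (with multiplicity).
import Mathlib
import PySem

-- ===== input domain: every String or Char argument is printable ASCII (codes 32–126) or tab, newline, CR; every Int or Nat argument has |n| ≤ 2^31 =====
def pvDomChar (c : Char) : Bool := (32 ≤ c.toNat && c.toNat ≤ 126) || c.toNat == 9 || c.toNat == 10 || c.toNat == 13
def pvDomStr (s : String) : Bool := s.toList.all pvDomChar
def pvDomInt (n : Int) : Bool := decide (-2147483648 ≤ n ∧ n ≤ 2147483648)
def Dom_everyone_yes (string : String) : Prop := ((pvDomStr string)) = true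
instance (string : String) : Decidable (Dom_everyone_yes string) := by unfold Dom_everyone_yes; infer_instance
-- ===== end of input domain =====

-- B replaces A's nested replace/membership mutation loop by a set-intersection pass
-- followed by one count over the first token's characters (objective: simpler).

-- ===== PORT A =====
-- the two nested loops of A, on tokens as lists of chars
def pvAouter (tokens : List (List Char)) (q0 : List Char) : List Char :=
  (PySem.List.pyRange 1 (PySem.List.len tokens) 1).foldl
    (fun q ii =>
      q.foldl (fun cur c =>
        if PySem.Chars.isIn [c] (PySem.List.pyGetD tokens ii []) then cur
        else PySem.Chars.replace cur [c] []) q)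
    q0

def everyone_yes (string : String) : Int :=
  match (PySem.Str.split₀ string).map String.toList with
  | [] => 0  -- Python raises IndexError here; excluded by Pre_
  | q0 :: rest => ((pvAouter (q0 :: rest) q0).length : Int)

-- ===== PORT B =====
def everyone_yes_alt (string : String) : Int :=
  match (PySem.Str.split₀ string).map String.toList with
  | [] => 0  -- Python raises IndexError here; excluded by Pre_
  | t0 :: rest =>
    let common := rest.foldl (fun s t => s.filter (fun c => t.contains c)) (PySem.Set.ofList t0)
    ((t0.countP (fun c => common.contains c) : Nat) : Int)

-- ===== PRECONDITION & SPEC =====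
-- Pre_ excludes only the inputs with no whitespace-separated token, where A raises IndexError.
def Pre_everyone_yes (string : String) : Prop := PySem.Str.split₀ string ≠ []
instance (string : String) : Decidable (Pre_everyone_yes string) := by unfold Pre_everyone_yes; infer_instance
def pvWitness_everyone_yes : String := "abc cab"

def Spec_everyone_yes (string : String) (out : Int) : Prop := out = everyone_yes_alt string
instance (string : String) (out : Int) : Decidable (Spec_everyone_yes string out) := by unfold Spec_everyone_yes; infer_instance

-- ===== CLAIM (what is proved, stated in full; the proofs are below) =====
def Claim_equal_everyone_yes : Prop := ∀ (string : String), Dom_everyone_yes string → Pre_everyone_yes string → Spec_everyone_yes string (everyone_yes string)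

-- ===== LEMMAS AND PROOFS =====

-- replace with a single-char pattern and empty replacement is a filter
theorem pv_replace_go_filter (c : Char) (fuel : Nat) (l acc : List Char)
    (h : l.length ≤ fuel) :
    PySem.Chars.replace.go [c] [] fuel l acc = acc.reverse ++ l.filter (fun a => !(a == c)) := by
  induction fuel generalizing l acc with
  | zero =>
    cases l with
    | nil => simp [PySem.Chars.replace.go]
    | cons x t => simp at h
  | succ n ih =>
    cases l with
    | nil => simp [PySem.Chars.replace.go]
    | cons x t =>
      simp only [PySem.Chars.replace.go]
      by_cases hx : x = c
      · subst hx
        simp only [List.isPrefixOf]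
        rw [if_pos (by simp)]
        rw [ih _ _ (by simpa using Nat.le_of_succ_le_succ h)]
        simp
      · rw [if_neg (by simp [List.isPrefixOf]; exact fun hcx => hx hcx.symm)]
        rw [ih _ _ (by simpa using Nat.le_of_succ_le_succ h)]
        rw [List.filter_cons_of_pos (by simp [hx])]
        simp

theorem pv_replace_filter (cur : List Char) (c : Char) :
    PySem.Chars.replace cur [c] [] = cur.filter (fun a => !(a == c)) := by
  simp only [PySem.Chars.replace, List.isEmpty_cons]
  simpa using pv_replace_go_filter c cur.length cur [] le_rfl

-- the inner 'for char in q_yes: …' loop removes exactly the chars failing p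
theorem pv_removal_fold (p : Char → Bool) (xs : List Char) :
    ∀ cur : List Char,
    xs.foldl (fun cur c => if p c then cur else cur.filter (fun a => !(a == c))) cur
      = cur.filter (fun a => p a || !(xs.contains a)) := by
  induction xs with
  | nil => intro cur; simp
  | cons x t ih =>
    intro cur
    simp only [List.foldl_cons]
    by_cases hp : p x
    · rw [if_pos hp, ih]
      apply List.filter_congr
      intro a _
      by_cases hax : a = x
      · subst hax; simp [hp]
      · simp [hax]
    · rw [if_neg hp, ih, List.filter_filter]
      apply List.filter_congr
      intro a _
      by_cases hax : a = x
      · subst hax; simp [hp]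
      · simp [hax]

-- singleton substring test = membership
theorem pv_isIn_singleton (c : Char) (t : List Char) :
    PySem.Chars.isIn [c] t = t.contains c := by
  by_cases h : c ∈ t
  · simp only [List.contains_eq_mem, h, decide_true]
    obtain ⟨s1, s2, rfl⟩ := List.append_of_mem h
    exact (PySem.Chars.isIn_iff_infix [c] _).2 ⟨s1, s2, by simp⟩
  · simp only [List.contains_eq_mem, h, decide_false]
    rw [PySem.Chars.isIn_eq_false_iff]
    intro hinf
    exact h (hinf.mem (by simp))

-- one outer-loop body = filter by membership in that token
theorem pv_inner_filter (tok q : List Char) :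
    q.foldl (fun cur c => if PySem.Chars.isIn [c] tok then cur
                          else PySem.Chars.replace cur [c] []) q
      = q.filter (fun c => tok.contains c) := by
  have h1 : (fun (cur : List Char) (c : Char) =>
      if PySem.Chars.isIn [c] tok then cur else PySem.Chars.replace cur [c] [])
      = fun cur c => if tok.contains c then cur else cur.filter (fun a => !(a == c)) := by
    funext cur c
    rw [pv_replace_filter, pv_isIn_singleton]
  rw [h1, pv_removal_fold]
  apply List.filter_congr
  intro a ha
  simp [ha]

-- folding filters = filter by 'in every token'
theorem pv_fold_filter (rest : List (List Char)) :
    ∀ init : List Char,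
    rest.foldl (fun s t => s.filter (fun c => t.contains c)) init
      = init.filter (fun c => rest.all (fun t => t.contains c)) := by
  induction rest with
  | nil => intro init; simp
  | cons t r ih =>
    intro init
    simp only [List.foldl_cons]
    rw [ih, List.filter_filter]
    apply List.filter_congr
    intro a _
    simp [Bool.and_comm]

theorem pv_pvAouter_eq (q0 : List Char) (rest : List (List Char)) :
    pvAouter (q0 :: rest) q0 = q0.filter (fun c => rest.all (fun t => t.contains c)) := by
  unfold pvAouter
  rw [PySem.List.foldl_pyRange_pyGetD (q0 :: rest) []
    (fun q tok => q.foldl (fun cur c =>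
      if PySem.Chars.isIn [c] tok then cur else PySem.Chars.replace cur [c] []) q)
    q0 (by norm_num)]
  simp only [Int.toNat_one, List.drop_succ_cons, List.drop_zero]
  have : ∀ (r : List (List Char)) (q : List Char),
      r.foldl (fun q tok => q.foldl (fun cur c =>
        if PySem.Chars.isIn [c] tok then cur else PySem.Chars.replace cur [c] []) q) q
      = r.foldl (fun s t => s.filter (fun c => t.contains c)) q := by
    intro r
    induction r with
    | nil => intro q; rfl
    | cons t r ih => intro q; simp only [List.foldl_cons]; rw [pv_inner_filter, ih]
  rw [this, pv_fold_filter]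

-- ===== VERDICT (by name: the statement is the Claim_ definition above) =====
theorem everyone_yes_spec : Claim_equal_everyone_yes := by
  intro string _ _
  unfold Spec_everyone_yes everyone_yes everyone_yes_alt
  cases h : (PySem.Str.split₀ string).map String.toList with
  | nil => rfl
  | cons t0 rest =>
    simp only []
    rw [pv_pvAouter_eq, pv_fold_filter, ← List.countP_eq_length_filter]
    congr 1
    · apply List.countP_congr
      intro c hc
      have hmem : c ∈ PySem.Set.ofList t0 := (PySem.Set.mem_ofList t0 c).2 hc
      constructor <;> intro h' <;>
        simp_all [List.contains_eq_mem, List.mem_filter]
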